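-- pv_equiv track=rewrite | github.com/Edofo/find-path-algo | solutions/nolan/bin/2/nolan-fuel-v2-test4.py | reachable_roads
-- ===== SOURCE A (Python) =====
-- def reachable_roads(graph, start):
--     """
--     Explore toutes les routes accessibles depuis un nœud donné (sans limite de batterie).
--     """
--     visited_nodes = set()
--     visited_edges = set()
--     stack = [start]
--
--     while stack:
--         node = stack.pop()
--         if node in visited_nodes:
--             continue
--         visited_nodes.add(node)
--
--         for neighbor in graph[node]:
--             edge = (min(node, neighbor[0]), max(node, neighbor[0]))  # Normalisation des arêtes
--             if edge not in visited_edges: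
--                 visited_edges.add(edge)
--                 stack.append(neighbor[0])
--
--     return len(visited_edges)
-- ===== SOURCE B (Python) =====
-- def reachable_roads(graph, start):
--     # Phase 1: plain DFS computing the set of reachable nodes.
--     visited = set()
--     stack = [start]
--     while stack:
--         u = stack.pop()
--         if u in visited:
--             continue
--         visited.add(u)
--         for nb in graph[u]:
--             stack.append(nb[0])
--     # Phase 2: aggregate the normalized edges incident to reachable nodes.
--     edges = set()
--     for u in visited:
--         for nb in graph[u]:
--             a, b = u, nb[0]
--             edges.add((a, b) if a <= b else (b, a))
--     return len(edges)
-- ===== Notes on version B (the rewrite author's own statement) =====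
-- stated objective: alternative
-- what changed: A's single interleaved DFS that gates stack pushes on edge novelty and counts edges as it walks is replaced by two separate phases: a plain node-reachability DFS, then an aggregation pass building the normalized edge set over all reachable nodes.
import Mathlib
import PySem

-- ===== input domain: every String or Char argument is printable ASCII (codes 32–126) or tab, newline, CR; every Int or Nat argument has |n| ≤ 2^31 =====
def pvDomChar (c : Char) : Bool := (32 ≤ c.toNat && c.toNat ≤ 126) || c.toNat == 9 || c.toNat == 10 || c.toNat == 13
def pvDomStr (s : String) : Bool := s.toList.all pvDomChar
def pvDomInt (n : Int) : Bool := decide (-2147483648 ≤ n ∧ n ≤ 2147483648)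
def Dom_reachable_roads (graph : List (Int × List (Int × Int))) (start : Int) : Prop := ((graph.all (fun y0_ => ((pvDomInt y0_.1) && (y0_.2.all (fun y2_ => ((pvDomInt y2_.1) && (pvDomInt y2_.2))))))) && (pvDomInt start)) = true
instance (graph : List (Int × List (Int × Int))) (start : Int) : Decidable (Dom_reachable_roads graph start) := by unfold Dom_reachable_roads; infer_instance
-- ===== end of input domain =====

-- B replaces A's single DFS that gates pushes on edge novelty by a plain reachability DFS followed by
-- a separate edge-aggregation pass (objective: alternative decomposition; equivalence of RETURN values proved).

-- shared helper: Python's graph[u] (dict lookup, first match); a missing key is Python's KeyError,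
-- excluded by Pre_reachable_roads, so the [] default is never taken on admitted inputs
def pyAdj (graph : List (Int × List (Int × Int))) (u : Int) : List (Int × Int) :=
  ((graph.find? (fun p => p.1 == u)).map (fun p => p.2)).getD []

-- ===== PORT A =====
-- the for-loop over graph[node]: add each new normalized edge, pushing its far endpoint
def raEdges (node : Int) (st : PySem.Set (Int × Int) × List Int) (nbs : List (Int × Int)) :
    PySem.Set (Int × Int) × List Int :=
  nbs.foldl (fun st nb =>
    if PySem.Set.contains st.1 (min node nb.1, max node nb.1) then st
    else (PySem.Set.add st.1 (min node nb.1, max node nb.1), st.2 ++ [nb.1])) st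

-- the while loop; fuel is a port artifact (the Python loop terminates on its own), shown sufficient in the proofs
def raLoop (graph : List (Int × List (Int × Int))) :
    Nat → PySem.Set Int → PySem.Set (Int × Int) → List Int → PySem.Set Int × PySem.Set (Int × Int)
  | 0, vis, edges, _ => (vis, edges)
  | f + 1, vis, edges, stack =>
    match PySem.List.pop? stack (-1) with
    | none => (vis, edges)          -- stack empty: while loop ends
    | some (node, rest) =>
      if PySem.Set.contains vis node then raLoop graph f vis edges rest
      else
        let st := raEdges node (edges, rest) (pyAdj graph node)
        raLoop graph f (PySem.Set.add vis node) st.1 st.2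

def reachable_roads (graph : List (Int × List (Int × Int))) (start : Int) : Int :=
  PySem.Set.len
    (raLoop graph (1 + 2 * (graph.map (fun p => p.2.length)).sum)
      PySem.Set.empty PySem.Set.empty [start]).2

-- ===== PORT B =====
-- phase 1: plain reachability DFS, visited nodes only
def rbLoop (graph : List (Int × List (Int × Int))) :
    Nat → PySem.Set Int → List Int → PySem.Set Int
  | 0, vis, _ => vis
  | f + 1, vis, stack =>
    match PySem.List.pop? stack (-1) with
    | none => vis                   -- stack empty: while loop ends
    | some (u, rest) =>
      if PySem.Set.contains vis u then rbLoop graph f vis rest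
      else rbLoop graph f (PySem.Set.add vis u) (rest ++ (pyAdj graph u).map (fun nb => nb.1))

def reachable_roads_alt (graph : List (Int × List (Int × Int))) (start : Int) : Int :=
  let visited := rbLoop graph (1 + (graph.map (fun p => p.2.length)).sum) PySem.Set.empty [start]
  -- phase 2: aggregate the normalized edges incident to the reachable nodes
  let edges := visited.foldl (fun es u =>
    (pyAdj graph u).foldl (fun es nb =>
      PySem.Set.add es (if u ≤ nb.1 then (u, nb.1) else (nb.1, u))) es) PySem.Set.empty
  PySem.Set.len edges

-- ===== PRECONDITION & SPEC =====
-- the set of nodes reachable from start (non-key nodes have no neighbors); |graph| expansion steps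
-- reach every node, since every hop beyond the first goes through a distinct key of the graph
def pvReachSet (graph : List (Int × List (Int × Int))) (start : Int) : List Int :=
  (fun s => PySem.Set.update s
    (s.flatMap (fun u => (pyAdj graph u).map (fun nb => nb.1))))^[graph.length] [start]

-- Pre_ excludes exactly the inputs on which Python A raises KeyError: those where some node
-- reachable from start is not a key of the graph
def Pre_reachable_roads (graph : List (Int × List (Int × Int))) (start : Int) : Prop :=
  ∀ x ∈ pvReachSet graph start, x ∈ graph.map (fun p => p.1)
instance (graph : List (Int × List (Int × Int))) (start : Int) : Decidable (Pre_reachable_roads graph start) := by unfold Pre_reachable_roads; infer_instance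

def pvWitness_reachable_roads : (List (Int × List (Int × Int))) × Int :=
  ([(0, [(1, 2)]), (1, [(0, 2), (2, 1)]), (2, [])], 0)

def Spec_reachable_roads (graph : List (Int × List (Int × Int))) (start : Int) (out : Int) : Prop := out = reachable_roads_alt graph start
instance (graph : List (Int × List (Int × Int))) (start : Int) (out : Int) : Decidable (Spec_reachable_roads graph start out) := by unfold Spec_reachable_roads; infer_instance

-- ===== CLAIM (what is proved, stated in full; the proofs are below) =====
def Claim_equal_reachable_roads : Prop := ∀ (graph : List (Int × List (Int × Int))) (start : Int), Dom_reachable_roads graph start → Pre_reachable_roads graph start → Spec_reachable_roads graph start (reachable_roads graph start)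

-- ===== LEMMAS AND PROOFS =====

-- reachability from start following adjacency lists (the common semantics of both loops)
inductive PvReach (graph : List (Int × List (Int × Int))) (start : Int) : Int → Prop
  | base : PvReach graph start start
  | step (u : Int) (nb : Int × Int) :
      PvReach graph start u → nb ∈ pyAdj graph u → PvReach graph start nb.1

-- all normalized edges the graph can ever produce (used only to bound the fuel)
def pvAllEdges (graph : List (Int × List (Int × Int))) : List (Int × Int) :=
  graph.flatMap (fun p => p.2.map (fun q => (min p.1 q.1, max p.1 q.1)))

theorem pvAllEdges_length (graph : List (Int × List (Int × Int))) :
    (pvAllEdges graph).length = (graph.map (fun p => p.2.length)).sum := by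
  simp [pvAllEdges]

theorem mem_pvAllEdges {graph : List (Int × List (Int × Int))} {u : Int} {nb : Int × Int}
    (h : nb ∈ pyAdj graph u) : (min u nb.1, max u nb.1) ∈ pvAllEdges graph := by
  unfold pyAdj at h
  cases hf : graph.find? (fun p => p.1 == u) with
  | none => rw [hf] at h; simp at h
  | some p =>
    rw [hf] at h; simp at h
    have hp : p ∈ graph := List.mem_of_find?_eq_some hf
    have he : p.1 = u := by have := List.find?_some hf; simpa using this
    subst he
    simp only [pvAllEdges, List.mem_flatMap]
    exact ⟨p, hp, List.mem_map.mpr ⟨nb, h, rfl⟩⟩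

theorem pvNorm_cases {u a v b : Int}
    (h : (min u a, max u a) = (min v b, max v b)) : (u = v ∧ a = b) ∨ (u = b ∧ a = v) := by
  have h1 : min u a = min v b := congrArg Prod.fst h
  have h2 : max u a = max v b := congrArg Prod.snd h
  simp only [min_def, max_def] at h1 h2
  split_ifs at h1 h2 <;> omega

theorem pvNorm_if (u v : Int) :
    (if u ≤ v then (u, v) else (v, u)) = (min u v, max u v) := by
  split_ifs with h <;> simp [min_def, max_def, h]

-- properties of the inner for-loop of A
theorem raEdges_spec (node : Int) (nbs : List (Int × Int)) :
    ∀ st : PySem.Set (Int × Int) × List Int, st.1.Nodup →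
    (∀ e, e ∈ (raEdges node st nbs).1 ↔
        e ∈ st.1 ∨ ∃ nb ∈ nbs, e = (min node nb.1, max node nb.1)) ∧
    (∀ x ∈ st.2, x ∈ (raEdges node st nbs).2) ∧
    (∀ x ∈ (raEdges node st nbs).2, x ∈ st.2 ∨ ∃ nb ∈ nbs, x = nb.1) ∧
    (∀ nb ∈ nbs, (min node nb.1, max node nb.1) ∈ st.1 ∨ nb.1 ∈ (raEdges node st nbs).2) ∧
    (raEdges node st nbs).1.Nodup ∧
    (raEdges node st nbs).2.length + st.1.length = st.2.length + (raEdges node st nbs).1.length ∧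
    st.1.length ≤ (raEdges node st nbs).1.length := by
  induction nbs with
  | nil =>
    intro st h1
    refine ⟨?_, ?_, ?_, ?_, h1, ?_, ?_⟩ <;> simp [raEdges]
  | cons nb nbs ih =>
    intro st h1
    by_cases hc : (min node nb.1, max node nb.1) ∈ st.1
    · have hre : raEdges node st (nb :: nbs) = raEdges node st nbs := by
        unfold raEdges
        rw [List.foldl_cons]
        congr 1
        simp [hc]
      obtain ⟨H1, H2, H3, H4, H5, H6, H7⟩ := ih st h1
      rw [hre]
      refine ⟨?_, H2, ?_, ?_, H5, H6, H7⟩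
      · intro e
        rw [H1 e]
        constructor
        · rintro (h | ⟨m, hm, rfl⟩)
          · exact Or.inl h
          · exact Or.inr ⟨m, List.mem_cons_of_mem _ hm, rfl⟩
        · rintro (h | ⟨m, hm, rfl⟩)
          · exact Or.inl h
          · rcases List.mem_cons.mp hm with rfl | hm'
            · exact Or.inl hc
            · exact Or.inr ⟨m, hm', rfl⟩
      · intro x hx
        rcases H3 x hx with h | ⟨m, hm, rfl⟩
        · exact Or.inl h
        · exact Or.inr ⟨m, List.mem_cons_of_mem _ hm, rfl⟩
      · intro m hm
        rcases List.mem_cons.mp hm with rfl | hm'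
        · exact Or.inl hc
        · exact H4 m hm'
    · have hre : raEdges node st (nb :: nbs) =
          raEdges node (PySem.Set.add st.1 (min node nb.1, max node nb.1), st.2 ++ [nb.1]) nbs := by
        unfold raEdges
        rw [List.foldl_cons]
        congr 1
        simp [hc]
      have h1' : (PySem.Set.add st.1 (min node nb.1, max node nb.1)).Nodup :=
        PySem.Set.nodup_add _ _ h1
      obtain ⟨H1, H2, H3, H4, H5, H6, H7⟩ :=
        ih (PySem.Set.add st.1 (min node nb.1, max node nb.1), st.2 ++ [nb.1]) h1'
      rw [hre]
      refine ⟨?_, ?_, ?_, ?_, H5, ?_, ?_⟩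
      · intro e
        rw [H1 e]
        simp only [PySem.Set.mem_add]
        constructor
        · rintro ((h | rfl) | ⟨m, hm, rfl⟩)
          · exact Or.inl h
          · exact Or.inr ⟨nb, List.mem_cons_self .., rfl⟩
          · exact Or.inr ⟨m, List.mem_cons_of_mem _ hm, rfl⟩
        · rintro (h | ⟨m, hm, rfl⟩)
          · exact Or.inl (Or.inl h)
          · rcases List.mem_cons.mp hm with rfl | hm'
            · exact Or.inl (Or.inr rfl)
            · exact Or.inr ⟨m, hm', rfl⟩
      · intro x hx
        exact H2 x (List.mem_append.mpr (Or.inl hx))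
      · intro x hx
        rcases H3 x hx with h | ⟨m, hm, rfl⟩
        · rcases List.mem_append.mp h with h' | h'
          · exact Or.inl h'
          · simp at h'
            exact Or.inr ⟨nb, List.mem_cons_self .., h'⟩
        · exact Or.inr ⟨m, List.mem_cons_of_mem _ hm, rfl⟩
      · intro m hm
        rcases List.mem_cons.mp hm with rfl | hm'
        · exact Or.inr (H2 _ (List.mem_append.mpr (Or.inr (by simp))))
        · rcases H4 m hm' with h | h
          · rcases (PySem.Set.mem_add _ _ _).mp h with h' | h'
            · exact Or.inl h'
            · refine Or.inr ?_
              have hmm : m.1 = nb.1 := by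
                rcases pvNorm_cases h' with ⟨_, h2⟩ | ⟨h2, h3⟩ <;> omega
              rw [hmm]
              exact H2 _ (List.mem_append.mpr (Or.inr (by simp)))
          · exact Or.inr h
      · have H6' : (raEdges node (PySem.Set.add st.1 (min node nb.1, max node nb.1),
              st.2 ++ [nb.1]) nbs).2.length
            + (PySem.Set.add st.1 (min node nb.1, max node nb.1)).length
            = (st.2 ++ [nb.1]).length
            + (raEdges node (PySem.Set.add st.1 (min node nb.1, max node nb.1),
              st.2 ++ [nb.1]) nbs).1.length := H6
        have hadd : (PySem.Set.add st.1 (min node nb.1, max node nb.1)).length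
            = st.1.length + 1 := by
          rw [PySem.Set.add_of_not_mem hc]; simp
        have happ : (st.2 ++ [nb.1]).length = st.2.length + 1 := by simp
        omega
      · have H7' : (PySem.Set.add st.1 (min node nb.1, max node nb.1)).length
            ≤ (raEdges node (PySem.Set.add st.1 (min node nb.1, max node nb.1),
              st.2 ++ [nb.1]) nbs).1.length := H7
        have hadd : (PySem.Set.add st.1 (min node nb.1, max node nb.1)).length
            = st.1.length + 1 := by
          rw [PySem.Set.add_of_not_mem hc]; simp
        omega

-- master lemma for A's while loop: with enough fuel the loop drains its stack; the visited set is
-- then closed under adjacency and contains the initial visited set and stack, and the edge set is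
-- exactly the set of normalized edges incident to the visited set
theorem raLoop_spec (graph : List (Int × List (Int × Int))) :
    ∀ (f : Nat) (vis : PySem.Set Int) (edges : PySem.Set (Int × Int)) (stack : List Int),
    vis.Nodup → edges.Nodup →
    (∀ e ∈ edges, e ∈ pvAllEdges graph) →
    (∀ e, e ∈ edges ↔ ∃ u ∈ vis, ∃ nb ∈ pyAdj graph u, e = (min u nb.1, max u nb.1)) →
    (∀ u ∈ vis, ∀ nb ∈ pyAdj graph u, nb.1 ∈ vis ∨ nb.1 ∈ stack) →
    stack.length + 2 * ((pvAllEdges graph).length - edges.length) ≤ f →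
    (∀ x ∈ vis, x ∈ (raLoop graph f vis edges stack).1) ∧
    (∀ x ∈ stack, x ∈ (raLoop graph f vis edges stack).1) ∧
    (∀ u ∈ (raLoop graph f vis edges stack).1, ∀ nb ∈ pyAdj graph u,
        nb.1 ∈ (raLoop graph f vis edges stack).1) ∧
    (∀ e, e ∈ (raLoop graph f vis edges stack).2 ↔
        ∃ u ∈ (raLoop graph f vis edges stack).1, ∃ nb ∈ pyAdj graph u,
          e = (min u nb.1, max u nb.1)) ∧
    (raLoop graph f vis edges stack).2.Nodup := by
  intro f
  induction f with
  | zero =>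
    intro vis edges stack hnv hne hsub hinc hcl hfuel
    have hstack : stack = [] := List.length_eq_zero_iff.mp (by omega)
    subst hstack
    refine ⟨fun x hx => hx, fun x hx => absurd hx (List.not_mem_nil), ?_, hinc, hne⟩
    intro u hu nb hnb
    rcases hcl u hu nb hnb with h | h
    · exact h
    · exact absurd h (List.not_mem_nil)
  | succ f ih =>
    intro vis edges stack hnv hne hsub hinc hcl hfuel
    rcases List.eq_nil_or_concat stack with rfl | ⟨rest, node, hst⟩
    · have hre : raLoop graph (f + 1) vis edges [] = (vis, edges) := rfl
      rw [hre]
      refine ⟨fun x hx => hx, fun x hx => absurd hx (List.not_mem_nil), ?_, hinc, hne⟩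
      intro u hu nb hnb
      rcases hcl u hu nb hnb with h | h
      · exact h
      · exact absurd h (List.not_mem_nil)
    · rw [List.concat_eq_append] at hst
      subst hst
      have hpop : PySem.List.pop? (rest ++ [node]) (-1) = some (node, rest) :=
        PySem.List.pop?_last rest node
      have hlen : (rest ++ [node]).length = rest.length + 1 := by simp
      by_cases hv : node ∈ vis
      · have hre : raLoop graph (f + 1) vis edges (rest ++ [node]) =
            raLoop graph f vis edges rest := by
          simp only [raLoop, hpop]
          simp [hv]
        have hcl' : ∀ u ∈ vis, ∀ nb ∈ pyAdj graph u, nb.1 ∈ vis ∨ nb.1 ∈ rest := by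
          intro u hu nb hnb
          rcases hcl u hu nb hnb with h | h
          · exact Or.inl h
          · rcases List.mem_append.mp h with h' | h'
            · exact Or.inr h'
            · simp at h'
              exact Or.inl (by rw [h']; exact hv)
        have hfuel' : rest.length + 2 * ((pvAllEdges graph).length - edges.length) ≤ f := by
          omega
        obtain ⟨H1, H2, H3, H4, H5⟩ := ih vis edges rest hnv hne hsub hinc hcl' hfuel'
        rw [hre]
        refine ⟨H1, ?_, H3, H4, H5⟩
        intro x hx
        rcases List.mem_append.mp hx with h | h
        · exact H2 x h
        · simp at h
          rw [h]
          exact H1 node hv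
      · have hre : raLoop graph (f + 1) vis edges (rest ++ [node]) =
            raLoop graph f (PySem.Set.add vis node)
              (raEdges node (edges, rest) (pyAdj graph node)).1
              (raEdges node (edges, rest) (pyAdj graph node)).2 := by
          simp only [raLoop, hpop]
          simp [hv]
        obtain ⟨R1, R2, R3, R4, R5, R6, R7⟩ := raEdges_spec node (pyAdj graph node) (edges, rest) hne
        have R6' : (raEdges node (edges, rest) (pyAdj graph node)).2.length + edges.length
            = rest.length + (raEdges node (edges, rest) (pyAdj graph node)).1.length := R6
        have R7' : edges.length ≤ (raEdges node (edges, rest) (pyAdj graph node)).1.length := R7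
        have hnv' : (PySem.Set.add vis node).Nodup := PySem.Set.nodup_add _ _ hnv
        have hsub' : ∀ e ∈ (raEdges node (edges, rest) (pyAdj graph node)).1,
            e ∈ pvAllEdges graph := by
          intro e he
          rcases (R1 e).mp he with h | ⟨m, hm, rfl⟩
          · exact hsub e h
          · exact mem_pvAllEdges hm
        have hinc' : ∀ e, e ∈ (raEdges node (edges, rest) (pyAdj graph node)).1 ↔
            ∃ u ∈ PySem.Set.add vis node, ∃ nb ∈ pyAdj graph u,
              e = (min u nb.1, max u nb.1) := by
          intro e
          rw [R1 e]
          constructor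
          · rintro (h | ⟨m, hm, rfl⟩)
            · rcases (hinc e).mp h with ⟨u, hu, m, hm, rfl⟩
              exact ⟨u, (PySem.Set.mem_add _ _ _).mpr (Or.inl hu), m, hm, rfl⟩
            · exact ⟨node, (PySem.Set.mem_add _ _ _).mpr (Or.inr rfl), m, hm, rfl⟩
          · rintro ⟨u, hu, m, hm, rfl⟩
            rcases (PySem.Set.mem_add _ _ _).mp hu with hu' | rfl
            · exact Or.inl ((hinc _).mpr ⟨u, hu', m, hm, rfl⟩)
            · exact Or.inr ⟨m, hm, rfl⟩
        have hcl' : ∀ u ∈ PySem.Set.add vis node, ∀ nb ∈ pyAdj graph u,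
            nb.1 ∈ PySem.Set.add vis node ∨
            nb.1 ∈ (raEdges node (edges, rest) (pyAdj graph node)).2 := by
          intro u hu nb hnb
          rcases (PySem.Set.mem_add _ _ _).mp hu with hu' | hueq
          · rcases hcl u hu' nb hnb with h | h
            · exact Or.inl ((PySem.Set.mem_add _ _ _).mpr (Or.inl h))
            · rcases List.mem_append.mp h with h' | h'
              · exact Or.inr (R2 _ h')
              · simp at h'
                exact Or.inl ((PySem.Set.mem_add _ _ _).mpr (Or.inr h'))
          · rw [hueq] at hnb
            rcases R4 nb hnb with h | h
            · rcases (hinc _).mp h with ⟨u', hu', m, hm, hEq⟩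
              rcases pvNorm_cases hEq with ⟨h2, _⟩ | ⟨_, h3⟩
              · exact absurd (show node ∈ vis by rw [h2]; exact hu') hv
              · exact Or.inl ((PySem.Set.mem_add _ _ _).mpr
                  (Or.inl (by rw [h3]; exact hu')))
            · exact Or.inr h
        have hfuel' : (raEdges node (edges, rest) (pyAdj graph node)).2.length +
            2 * ((pvAllEdges graph).length -
              (raEdges node (edges, rest) (pyAdj graph node)).1.length) ≤ f := by
          have hEl : (raEdges node (edges, rest) (pyAdj graph node)).1.length ≤
              (pvAllEdges graph).length :=
            (List.Nodup.subperm R5 (fun e he => hsub' e he)).length_le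
          have hel : edges.length ≤ (pvAllEdges graph).length :=
            (List.Nodup.subperm hne (fun e he => hsub e he)).length_le
          omega
        obtain ⟨H1, H2, H3, H4, H5⟩ := ih (PySem.Set.add vis node)
          (raEdges node (edges, rest) (pyAdj graph node)).1
          (raEdges node (edges, rest) (pyAdj graph node)).2 hnv' R5 hsub' hinc' hcl' hfuel'
        rw [hre]
        refine ⟨?_, ?_, H3, H4, H5⟩
        · intro x hx
          exact H1 x ((PySem.Set.mem_add _ _ _).mpr (Or.inl hx))
        · intro x hx
          rcases List.mem_append.mp hx with h | h
          · exact H2 x (R2 x h)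
          · simp at h
            rw [h]
            exact H1 node ((PySem.Set.mem_add _ _ _).mpr (Or.inr rfl))

theorem raLoop_sound (graph : List (Int × List (Int × Int))) (start : Int) :
    ∀ (f : Nat) (vis : PySem.Set Int) (edges : PySem.Set (Int × Int)) (stack : List Int),
    edges.Nodup →
    (∀ x ∈ vis, PvReach graph start x) → (∀ x ∈ stack, PvReach graph start x) →
    ∀ x ∈ (raLoop graph f vis edges stack).1, PvReach graph start x := by
  intro f
  induction f with
  | zero =>
    intro vis edges stack _ hv _ x hx
    exact hv x hx
  | succ f ih =>
    intro vis edges stack hne hv hs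
    rcases List.eq_nil_or_concat stack with rfl | ⟨rest, node, hst⟩
    · exact fun x hx => hv x hx
    · rw [List.concat_eq_append] at hst
      subst hst
      have hpop : PySem.List.pop? (rest ++ [node]) (-1) = some (node, rest) :=
        PySem.List.pop?_last rest node
      have hnode : PvReach graph start node := hs node (List.mem_append.mpr (Or.inr (by simp)))
      by_cases hvn : node ∈ vis
      · have hre : raLoop graph (f + 1) vis edges (rest ++ [node]) =
            raLoop graph f vis edges rest := by
          simp only [raLoop, hpop]
          simp [hvn]
        rw [hre]
        exact ih vis edges rest hne hv (fun x hx => hs x (List.mem_append.mpr (Or.inl hx)))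
      · have hre : raLoop graph (f + 1) vis edges (rest ++ [node]) =
            raLoop graph f (PySem.Set.add vis node)
              (raEdges node (edges, rest) (pyAdj graph node)).1
              (raEdges node (edges, rest) (pyAdj graph node)).2 := by
          simp only [raLoop, hpop]
          simp [hvn]
        obtain ⟨R1, R2, R3, R4, R5, R6, R7⟩ := raEdges_spec node (pyAdj graph node) (edges, rest) hne
        rw [hre]
        refine ih _ _ _ R5 ?_ ?_
        · intro x hx
          rcases (PySem.Set.mem_add _ _ _).mp hx with h | h
          · exact hv x h
          · rw [h]
            exact hnode
        · intro x hx
          rcases R3 x hx with h | ⟨m, hm, rfl⟩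
          · exact hs x (List.mem_append.mpr (Or.inl h))
          · exact PvReach.step node m hnode hm

-- the sum of adjacency-list lengths over keys not yet visited (B's fuel measure)
def rbRest (graph : List (Int × List (Int × Int))) (vis : PySem.Set Int) : Nat :=
  ((graph.filter (fun p => !(PySem.Set.contains vis p.1))).map (fun p => p.2.length)).sum

theorem rbRest_cons (p : Int × List (Int × Int)) (t : List (Int × List (Int × Int)))
    (vis : PySem.Set Int) :
    rbRest (p :: t) vis = (if p.1 ∈ vis then 0 else p.2.length) + rbRest t vis := by
  by_cases h : p.1 ∈ vis
  · rw [if_pos h]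
    simp [rbRest, h]
  · rw [if_neg h]
    simp [rbRest, h]

theorem rbRest_mono (graph : List (Int × List (Int × Int))) {vis vis' : PySem.Set Int}
    (h : ∀ x ∈ vis, x ∈ vis') : rbRest graph vis' ≤ rbRest graph vis := by
  induction graph with
  | nil => simp [rbRest]
  | cons p t ih =>
    rw [rbRest_cons, rbRest_cons]
    by_cases h1 : p.1 ∈ vis
    · rw [if_pos (h _ h1), if_pos h1]
      omega
    · rw [if_neg h1]
      by_cases h2 : p.1 ∈ vis'
      · rw [if_pos h2]
        omega
      · rw [if_neg h2]
        omega

theorem rbRest_drop (graph : List (Int × List (Int × Int))) {vis : PySem.Set Int} {node : Int}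
    (hnv : node ∉ vis) :
    (pyAdj graph node).length + rbRest graph (PySem.Set.add vis node) ≤ rbRest graph vis := by
  induction graph with
  | nil => simp [pyAdj, rbRest]
  | cons p t ih =>
    rw [rbRest_cons, rbRest_cons]
    by_cases hp : p.1 = node
    · have hadjc : pyAdj (p :: t) node = p.2 := by
        unfold pyAdj
        rw [List.find?_cons_of_pos (by simp [hp])]
        rfl
      have hmono : rbRest t (PySem.Set.add vis node) ≤ rbRest t vis :=
        rbRest_mono t (fun x hx => (PySem.Set.mem_add _ _ _).mpr (Or.inl hx))
      rw [hadjc, if_pos ((PySem.Set.mem_add _ _ _).mpr (Or.inr hp)),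
        if_neg (by rw [hp]; exact hnv)]
      omega
    · have hadjc : pyAdj (p :: t) node = pyAdj t node := by
        unfold pyAdj
        rw [List.find?_cons_of_neg (by simp [hp])]
      rw [hadjc]
      by_cases hm : p.1 ∈ vis
      · rw [if_pos hm, if_pos ((PySem.Set.mem_add _ _ _).mpr (Or.inl hm))]
        omega
      · rw [if_neg hm, if_neg (fun hx => by
          rcases (PySem.Set.mem_add _ _ _).mp hx with h' | h'
          · exact hm h'
          · exact hp h')]
        omega

theorem rbLoop_spec (graph : List (Int × List (Int × Int))) :
    ∀ (f : Nat) (vis : PySem.Set Int) (stack : List Int),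
    (∀ u ∈ vis, ∀ nb ∈ pyAdj graph u, nb.1 ∈ vis ∨ nb.1 ∈ stack) →
    stack.length + rbRest graph vis ≤ f →
    (∀ x ∈ vis, x ∈ rbLoop graph f vis stack) ∧
    (∀ x ∈ stack, x ∈ rbLoop graph f vis stack) ∧
    (∀ u ∈ rbLoop graph f vis stack, ∀ nb ∈ pyAdj graph u, nb.1 ∈ rbLoop graph f vis stack) := by
  intro f
  induction f with
  | zero =>
    intro vis stack hcl hfuel
    have hstack : stack = [] := List.length_eq_zero_iff.mp (by omega)
    subst hstack
    refine ⟨fun x hx => hx, fun x hx => absurd hx (List.not_mem_nil), ?_⟩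
    intro u hu nb hnb
    rcases hcl u hu nb hnb with h | h
    · exact h
    · exact absurd h (List.not_mem_nil)
  | succ f ih =>
    intro vis stack hcl hfuel
    rcases List.eq_nil_or_concat stack with rfl | ⟨rest, node, hst⟩
    · have hre : rbLoop graph (f + 1) vis [] = vis := rfl
      rw [hre]
      refine ⟨fun x hx => hx, fun x hx => absurd hx (List.not_mem_nil), ?_⟩
      intro u hu nb hnb
      rcases hcl u hu nb hnb with h | h
      · exact h
      · exact absurd h (List.not_mem_nil)
    · rw [List.concat_eq_append] at hst
      subst hst
      have hpop : PySem.List.pop? (rest ++ [node]) (-1) = some (node, rest) :=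
        PySem.List.pop?_last rest node
      have hlen : (rest ++ [node]).length = rest.length + 1 := by simp
      by_cases hv : node ∈ vis
      · have hre : rbLoop graph (f + 1) vis (rest ++ [node]) = rbLoop graph f vis rest := by
          simp only [rbLoop, hpop]
          simp [hv]
        have hcl' : ∀ u ∈ vis, ∀ nb ∈ pyAdj graph u, nb.1 ∈ vis ∨ nb.1 ∈ rest := by
          intro u hu nb hnb
          rcases hcl u hu nb hnb with h | h
          · exact Or.inl h
          · rcases List.mem_append.mp h with h' | h'
            · exact Or.inr h'
            · simp at h'
              exact Or.inl (by rw [h']; exact hv)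
        have hfuel' : rest.length + rbRest graph vis ≤ f := by omega
        obtain ⟨H1, H2, H3⟩ := ih vis rest hcl' hfuel'
        rw [hre]
        refine ⟨H1, ?_, H3⟩
        intro x hx
        rcases List.mem_append.mp hx with h | h
        · exact H2 x h
        · simp at h
          rw [h]
          exact H1 node hv
      · have hre : rbLoop graph (f + 1) vis (rest ++ [node]) =
            rbLoop graph f (PySem.Set.add vis node)
              (rest ++ (pyAdj graph node).map (fun nb => nb.1)) := by
          simp only [rbLoop, hpop]
          simp [hv]
        have hcl' : ∀ u ∈ PySem.Set.add vis node, ∀ nb ∈ pyAdj graph u,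
            nb.1 ∈ PySem.Set.add vis node ∨
            nb.1 ∈ rest ++ (pyAdj graph node).map (fun nb => nb.1) := by
          intro u hu nb hnb
          rcases (PySem.Set.mem_add _ _ _).mp hu with hu' | rfl
          · rcases hcl u hu' nb hnb with h | h
            · exact Or.inl ((PySem.Set.mem_add _ _ _).mpr (Or.inl h))
            · rcases List.mem_append.mp h with h' | h'
              · exact Or.inr (List.mem_append.mpr (Or.inl h'))
              · simp at h'
                exact Or.inl ((PySem.Set.mem_add _ _ _).mpr (Or.inr h'))
          · exact Or.inr (List.mem_append.mpr (Or.inr (List.mem_map.mpr ⟨nb, hnb, rfl⟩)))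
        have hfuel' : (rest ++ (pyAdj graph node).map (fun nb => nb.1)).length +
            rbRest graph (PySem.Set.add vis node) ≤ f := by
          have hdrop := rbRest_drop graph (vis := vis) (node := node) hv
          have hlen2 : (rest ++ (pyAdj graph node).map (fun nb => nb.1)).length
              = rest.length + (pyAdj graph node).length := by simp
          omega
        obtain ⟨H1, H2, H3⟩ := ih (PySem.Set.add vis node)
          (rest ++ (pyAdj graph node).map (fun nb => nb.1)) hcl' hfuel'
        rw [hre]
        refine ⟨?_, ?_, H3⟩
        · intro x hx
          exact H1 x ((PySem.Set.mem_add _ _ _).mpr (Or.inl hx))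
        · intro x hx
          rcases List.mem_append.mp hx with h | h
          · exact H2 x (List.mem_append.mpr (Or.inl h))
          · simp at h
            rw [h]
            exact H1 node ((PySem.Set.mem_add _ _ _).mpr (Or.inr rfl))

theorem rbLoop_sound (graph : List (Int × List (Int × Int))) (start : Int) :
    ∀ (f : Nat) (vis : PySem.Set Int) (stack : List Int),
    (∀ x ∈ vis, PvReach graph start x) → (∀ x ∈ stack, PvReach graph start x) →
    ∀ x ∈ rbLoop graph f vis stack, PvReach graph start x := by
  intro f
  induction f with
  | zero => intro vis stack hv _ x hx; exact hv x hx
  | succ f ih =>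
    intro vis stack hv hs
    rcases List.eq_nil_or_concat stack with rfl | ⟨rest, node, hst⟩
    · exact fun x hx => hv x hx
    · rw [List.concat_eq_append] at hst
      subst hst
      have hpop : PySem.List.pop? (rest ++ [node]) (-1) = some (node, rest) :=
        PySem.List.pop?_last rest node
      have hnode : PvReach graph start node := hs node (List.mem_append.mpr (Or.inr (by simp)))
      by_cases hvn : node ∈ vis
      · have hre : rbLoop graph (f + 1) vis (rest ++ [node]) = rbLoop graph f vis rest := by
          simp only [rbLoop, hpop]
          simp [hvn]
        rw [hre]
        exact ih vis rest hv (fun x hx => hs x (List.mem_append.mpr (Or.inl hx)))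
      · have hre : rbLoop graph (f + 1) vis (rest ++ [node]) =
            rbLoop graph f (PySem.Set.add vis node)
              (rest ++ (pyAdj graph node).map (fun nb => nb.1)) := by
          simp only [rbLoop, hpop]
          simp [hvn]
        rw [hre]
        refine ih _ _ ?_ ?_
        · intro x hx
          rcases (PySem.Set.mem_add _ _ _).mp hx with h | h
          · exact hv x h
          · rw [h]
            exact hnode
        · intro x hx
          rcases List.mem_append.mp hx with h | h
          · exact hs x (List.mem_append.mpr (Or.inl h))
          · rcases List.mem_map.mp h with ⟨m, hm, rfl⟩
            exact PvReach.step node m hnode hm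

-- B's phase 2, inner fold: the edges of one node
theorem rbInner_spec (u : Int) (nbs : List (Int × Int)) :
    ∀ es : PySem.Set (Int × Int), es.Nodup →
    (nbs.foldl (fun es nb =>
        PySem.Set.add es (if u ≤ nb.1 then (u, nb.1) else (nb.1, u))) es).Nodup ∧
    ∀ e, e ∈ nbs.foldl (fun es nb =>
        PySem.Set.add es (if u ≤ nb.1 then (u, nb.1) else (nb.1, u))) es ↔
      e ∈ es ∨ ∃ nb ∈ nbs, e = (min u nb.1, max u nb.1) := by
  induction nbs with
  | nil =>
    intro es h1
    refine ⟨h1, ?_⟩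
    simp
  | cons nb nbs ih =>
    intro es h1
    have hstep : (nb :: nbs).foldl (fun es nb =>
        PySem.Set.add es (if u ≤ nb.1 then (u, nb.1) else (nb.1, u))) es =
        nbs.foldl (fun es nb =>
          PySem.Set.add es (if u ≤ nb.1 then (u, nb.1) else (nb.1, u)))
          (PySem.Set.add es (min u nb.1, max u nb.1)) := by
      rw [List.foldl_cons, pvNorm_if]
    obtain ⟨H1, H2⟩ := ih (PySem.Set.add es (min u nb.1, max u nb.1))
      (PySem.Set.nodup_add _ _ h1)
    rw [hstep]
    refine ⟨H1, ?_⟩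
    intro e
    rw [H2 e]
    simp only [PySem.Set.mem_add]
    constructor
    · rintro ((h | rfl) | ⟨m, hm, rfl⟩)
      · exact Or.inl h
      · exact Or.inr ⟨nb, List.mem_cons_self .., rfl⟩
      · exact Or.inr ⟨m, List.mem_cons_of_mem _ hm, rfl⟩
    · rintro (h | ⟨m, hm, rfl⟩)
      · exact Or.inl (Or.inl h)
      · rcases List.mem_cons.mp hm with rfl | hm'
        · exact Or.inl (Or.inr rfl)
        · exact Or.inr ⟨m, hm', rfl⟩

-- B's phase 2 builds exactly the normalized edges incident to the node list it folds over
theorem rbEdges_spec (graph : List (Int × List (Int × Int))) :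
    ∀ (us : List Int) (es : PySem.Set (Int × Int)), es.Nodup →
    (us.foldl (fun es u =>
        (pyAdj graph u).foldl (fun es nb =>
          PySem.Set.add es (if u ≤ nb.1 then (u, nb.1) else (nb.1, u))) es) es).Nodup ∧
    ∀ e, e ∈ (us.foldl (fun es u =>
        (pyAdj graph u).foldl (fun es nb =>
          PySem.Set.add es (if u ≤ nb.1 then (u, nb.1) else (nb.1, u))) es) es) ↔
      e ∈ es ∨ ∃ u ∈ us, ∃ nb ∈ pyAdj graph u, e = (min u nb.1, max u nb.1) := by
  intro us
  induction us with
  | nil =>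
    intro es h1
    refine ⟨h1, ?_⟩
    simp
  | cons u us ih =>
    intro es h1
    obtain ⟨I1, I2⟩ := rbInner_spec u (pyAdj graph u) es h1
    obtain ⟨H1, H2⟩ := ih ((pyAdj graph u).foldl (fun es nb =>
      PySem.Set.add es (if u ≤ nb.1 then (u, nb.1) else (nb.1, u))) es) I1
    rw [List.foldl_cons]
    refine ⟨H1, ?_⟩
    intro e
    rw [H2 e, I2 e]
    constructor
    · rintro ((h | ⟨m, hm, rfl⟩) | ⟨u', hu', m, hm, rfl⟩)
      · exact Or.inl h
      · exact Or.inr ⟨u, List.mem_cons_self .., m, hm, rfl⟩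
      · exact Or.inr ⟨u', List.mem_cons_of_mem _ hu', m, hm, rfl⟩
    · rintro (h | ⟨u', hu', m, hm, rfl⟩)
      · exact Or.inl (Or.inl h)
      · rcases List.mem_cons.mp hu' with rfl | hu''
        · exact Or.inl (Or.inr ⟨m, hm, rfl⟩)
        · exact Or.inr ⟨u', hu'', m, hm, rfl⟩

-- final characterization of A's run: its edge set is exactly the set of normalized edges incident
-- to the reachable set, without duplicates
theorem raFinal (graph : List (Int × List (Int × Int))) (start : Int) :
    ((raLoop graph (1 + 2 * (graph.map (fun p => p.2.length)).sum)
        PySem.Set.empty PySem.Set.empty [start]).2).Nodup ∧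
    ∀ e, e ∈ (raLoop graph (1 + 2 * (graph.map (fun p => p.2.length)).sum)
        PySem.Set.empty PySem.Set.empty [start]).2 ↔
      ∃ u, PvReach graph start u ∧ ∃ nb ∈ pyAdj graph u, e = (min u nb.1, max u nb.1) := by
  obtain ⟨H1, H2, H3, H4, H5⟩ := raLoop_spec graph
    (1 + 2 * (graph.map (fun p => p.2.length)).sum) PySem.Set.empty PySem.Set.empty [start]
    List.nodup_nil List.nodup_nil (fun e he => absurd he (List.not_mem_nil))
    (by simp [PySem.Set.empty]) (fun u hu => absurd hu (List.not_mem_nil))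
    (by simp [pvAllEdges_length])
  have hsound := raLoop_sound graph start
    (1 + 2 * (graph.map (fun p => p.2.length)).sum) PySem.Set.empty PySem.Set.empty [start]
    List.nodup_nil (fun x hx => absurd hx (List.not_mem_nil))
    (by intro x hx; simp at hx; rw [hx]; exact PvReach.base)
  have hvis : ∀ x, x ∈ (raLoop graph (1 + 2 * (graph.map (fun p => p.2.length)).sum)
      PySem.Set.empty PySem.Set.empty [start]).1 ↔ PvReach graph start x := by
    intro x
    constructor
    · exact hsound x
    · intro h
      induction h with
      | base => exact H2 start (by simp)
      | step u nb hu hnb ihh => exact H3 u ihh nb hnb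
  refine ⟨H5, ?_⟩
  intro e
  rw [H4 e]
  constructor
  · rintro ⟨u, hu, m, hm, rfl⟩
    exact ⟨u, (hvis u).mp hu, m, hm, rfl⟩
  · rintro ⟨u, hu, m, hm, rfl⟩
    exact ⟨u, (hvis u).mpr hu, m, hm, rfl⟩

-- final characterization of B's phase 1: its visited set is exactly the reachable set
theorem rbFinal (graph : List (Int × List (Int × Int))) (start : Int) :
    ∀ x, x ∈ rbLoop graph (1 + (graph.map (fun p => p.2.length)).sum)
        PySem.Set.empty [start] ↔ PvReach graph start x := by
  have hrest : rbRest graph ([] : PySem.Set Int) = (graph.map (fun p => p.2.length)).sum := by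
    induction graph with
    | nil => simp [rbRest]
    | cons p t iht =>
      rw [rbRest_cons, if_neg (List.not_mem_nil), iht]
      simp
  obtain ⟨H1, H2, H3⟩ := rbLoop_spec graph (1 + (graph.map (fun p => p.2.length)).sum)
    PySem.Set.empty [start] (fun u hu => absurd hu (List.not_mem_nil))
    (by simp [PySem.Set.empty, hrest])
  have hsound := rbLoop_sound graph start (1 + (graph.map (fun p => p.2.length)).sum)
    PySem.Set.empty [start] (fun x hx => absurd hx (List.not_mem_nil))
    (by intro x hx; simp at hx; rw [hx]; exact PvReach.base)
  intro x
  constructor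
  · exact hsound x
  · intro h
    induction h with
    | base => exact H2 start (by simp)
    | step u nb hu hnb ihh => exact H3 u ihh nb hnb

-- ===== VERDICT (by name: the statement is the Claim_ definition above) =====
theorem reachable_roads_spec : Claim_equal_reachable_roads := by
  intro graph start _ _
  obtain ⟨hAnodup, hAmem⟩ := raFinal graph start
  have hBvis := rbFinal graph start
  obtain ⟨hBnodup, hBmem⟩ := rbEdges_spec graph
    (rbLoop graph (1 + (graph.map (fun p => p.2.length)).sum) PySem.Set.empty [start])
    PySem.Set.empty List.nodup_nil
  have hperm : ((rbLoop graph (1 + (graph.map (fun p => p.2.length)).sum)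
      PySem.Set.empty [start]).foldl (fun es u =>
        (pyAdj graph u).foldl (fun es nb =>
          PySem.Set.add es (if u ≤ nb.1 then (u, nb.1) else (nb.1, u))) es)
      PySem.Set.empty).Perm
      (raLoop graph (1 + 2 * (graph.map (fun p => p.2.length)).sum)
        PySem.Set.empty PySem.Set.empty [start]).2 := by
    rw [List.perm_ext_iff_of_nodup hBnodup hAnodup]
    intro e
    rw [hAmem e, hBmem e]
    constructor
    · rintro (h | ⟨u, hu, m, hm, rfl⟩)
      · exact absurd h (List.not_mem_nil)
      · exact ⟨u, (hBvis u).mp hu, m, hm, rfl⟩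
    · rintro ⟨u, hu, m, hm, rfl⟩
      exact Or.inr ⟨u, (hBvis u).mpr hu, m, hm, rfl⟩
  unfold Spec_reachable_roads reachable_roads reachable_roads_alt
  simp only [PySem.Set.len]
  rw [← List.Perm.length_eq hperm]
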